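-- pv_equiv track=rewrite | github.com/cvermilion/adventofcode | 2023/05/run.py | merge_maps
-- ===== SOURCE A (Python) =====
-- def merge_maps(m1, mm2):
-- 	mm2 = sorted(mm2)
-- 	(src1_start, src1_end), offset1 = m1
-- 	(dest1_start, dest1_end) = (src1_start+offset1, src1_end+offset1)
-- 	merged = []
-- 	# Scan through the intersections of m1's dest range and next stage's source ranges.
-- 	for m2 in mm2:
-- 		(src2_start, src2_end), offset2 = m2
-- 		if dest1_start < src2_start:
-- 			# At least some of this map's destination range isn't covered by
-- 			# m2's source; extract that part.  It just passes through with the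
-- 			# current offset.
-- 			span = min([src2_start, dest1_end]) - dest1_start
-- 			merged.append(((src1_start, src1_start+span), offset1))
--
-- 			src1_start += span
-- 			dest1_start += span
-- 			if src1_start == src1_end:
-- 				# All done!
-- 				break
-- 		if dest1_start < src2_end:
-- 			# Full or partial overlap with m2.
-- 			if dest1_end <= src2_end:
-- 				# Total overlap.
-- 				merged.append(((src1_start, src1_end), offset1+offset2))
-- 				src1_start = src1_end
-- 				dest1_start = dest1_end
-- 				if src1_start == src1_end:
-- 					# All done!
-- 					break
-- 			else:
-- 				# Partial overlap, extract overlap part.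
-- 				span = src2_end - dest1_start
-- 				merged.append(((src1_start, src1_start+span), offset1+offset2))
-- 				src1_start += span
-- 				dest1_start = src1_start + offset1
-- 	# if we get here, there is dest1 range left not covered by any mm2 source
-- 	if src1_start < src1_end:
-- 		merged.append(((src1_start, src1_end), offset1))
-- 	return merged
-- ===== SOURCE B (Python) =====
-- def merge_maps(m1, mm2):
--     (s1, e1), off1 = m1
--     if e1 <= s1:
--         return []
--     d0 = s1 + off1
--     d1 = e1 + off1
--     # pass 1: collect the disjoint overlap pieces of [d0, d1) with the
--     # next stage's source ranges, in destination coordinates.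
--     pieces = []
--     cur = d0
--     for (s2, e2), off2 in sorted(mm2):
--         lo = max(cur, s2)
--         hi = min(e2, d1)
--         if lo < hi:
--             pieces.append((lo, hi, off2))
--             cur = hi
--     # pass 2: interleave passthrough gaps between/around the pieces and
--     # convert everything back to source coordinates.
--     out = []
--     cur = d0
--     for lo, hi, off2 in pieces:
--         if cur < lo:
--             out.append(((cur - off1, lo - off1), off1))
--         out.append(((lo - off1, hi - off1), off1 + off2))
--         cur = hi
--     if cur < d1:
--         out.append(((cur - off1, e1), off1))
--     return out
-- ===== Notes on version B (the rewrite author's own statement) =====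
-- stated objective: alternative
-- what changed: A is a single stateful cursor loop that mutates src/dest starts with early breaks; B first collects the disjoint overlap pieces of the destination range with the sorted next-stage sources, then in a second pass interleaves passthrough gaps and converts back to source coordinates.
-- intended difference: When an empty next-stage range (src_end <= src_start) starts strictly inside the mapped destination range beyond every earlier bound, A needlessly splits a passthrough segment at that point; B returns the unsplit passthrough, the intended canonical map. — e.g. on merge_maps(((0, 2), 0), [((1, 1), 5)]): A returns [((0, 1), 0), ((1, 2), 0)], B returns [((0, 2), 0)]
-- outside the precondition, e.g. on merge_maps(((1, 0), 0), [((0, 5), 3)]): A returns [((1, 0), 3)], B returns []; on merge_maps(((0, 0), 0), [((0, 1), 1)]): A returns [((0, 0), 1)], B returns []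
import Mathlib
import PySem

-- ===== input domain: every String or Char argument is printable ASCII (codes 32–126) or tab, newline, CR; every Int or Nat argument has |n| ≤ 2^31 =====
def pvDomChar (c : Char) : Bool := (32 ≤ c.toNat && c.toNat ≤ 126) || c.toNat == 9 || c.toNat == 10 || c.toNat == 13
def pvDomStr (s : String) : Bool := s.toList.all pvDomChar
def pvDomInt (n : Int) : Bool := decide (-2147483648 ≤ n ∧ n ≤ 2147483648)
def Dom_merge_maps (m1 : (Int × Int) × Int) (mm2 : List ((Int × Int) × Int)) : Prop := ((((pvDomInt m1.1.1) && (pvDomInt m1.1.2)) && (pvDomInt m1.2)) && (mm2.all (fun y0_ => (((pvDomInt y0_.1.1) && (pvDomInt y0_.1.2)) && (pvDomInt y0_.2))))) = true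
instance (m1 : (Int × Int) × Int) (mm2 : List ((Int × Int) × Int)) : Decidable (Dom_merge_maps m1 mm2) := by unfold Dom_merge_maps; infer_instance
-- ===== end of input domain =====

-- B re-decomposes A's single stateful cursor loop into two passes (collect overlap
-- pieces, then interleave passthrough gaps); return-value equivalence is proved on
-- Pre_merge_maps outside D_merge_maps (an empty next-stage range splitting a
-- passthrough), where B returns the intended unsplit map.

-- Python's sorted(mm2) on nested int tuples: lexicographic order, via a Lex key.
def pvKey (x : (Int × Int) × Int) : Lex (Int × Lex (Int × Int)) := toLex (x.1.1, toLex (x.1.2, x.2))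

def pvSort (mm2 : List ((Int × Int) × Int)) : List ((Int × Int) × Int) := PySem.List.sorted mm2 pvKey

-- ===== PORT A =====
-- the for-loop of A: state (src1_start, dest1_start, merged); returns (merged, src1_start)
def mergeLoopA (e1 d1 o1 : Int) : List ((Int × Int) × Int) → Int → Int → List ((Int × Int) × Int) → List ((Int × Int) × Int) × Int
  | [], s, _d, acc => (acc, s)
  | ((s2, e2), o2) :: rest, s, d, acc =>
    if d < s2 then
      -- passthrough part before m2's source
      let span := min s2 d1 - d
      let acc' := acc ++ [((s, s + span), o1)]
      let s' := s + span
      let d' := d + span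
      if s' = e1 then (acc', s')           -- break
      else
        if d' < e2 then
          if d1 ≤ e2 then (acc' ++ [((s', e1), o1 + o2)], e1)   -- total overlap, break
          else
            let sp := e2 - d'
            mergeLoopA e1 d1 o1 rest (s' + sp) (s' + sp + o1) (acc' ++ [((s', s' + sp), o1 + o2)])
        else mergeLoopA e1 d1 o1 rest s' d' acc'
    else
      if d < e2 then
        if d1 ≤ e2 then (acc ++ [((s, e1), o1 + o2)], e1)       -- total overlap, break
        else
          let sp := e2 - d
          mergeLoopA e1 d1 o1 rest (s + sp) (s + sp + o1) (acc ++ [((s, s + sp), o1 + o2)])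
      else mergeLoopA e1 d1 o1 rest s d acc

def merge_maps (m1 : (Int × Int) × Int) (mm2 : List ((Int × Int) × Int)) : List ((Int × Int) × Int) :=
  let r := mergeLoopA m1.1.2 (m1.1.2 + m1.2) m1.2 (pvSort mm2) m1.1.1 (m1.1.1 + m1.2) []
  if r.2 < m1.1.2 then r.1 ++ [((r.2, m1.1.2), m1.2)] else r.1

-- ===== PORT B =====
-- pass 1 of Source B: the disjoint overlap pieces (lo, hi, off2) in destination coordinates
def piecesB (d1 : Int) : List ((Int × Int) × Int) → Int → List (Int × Int × Int)
  | [], _ => []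
  | ((s2, e2), o2) :: rest, cur =>
    let lo := max cur s2
    let hi := min e2 d1
    if lo < hi then (lo, hi, o2) :: piecesB d1 rest hi else piecesB d1 rest cur

-- pass 2 of Source B: interleave passthrough gaps, convert to source coordinates
def fillB (o1 e1 d1 : Int) : List (Int × Int × Int) → Int → List ((Int × Int) × Int)
  | [], cur => if cur < d1 then [((cur - o1, e1), o1)] else []
  | (lo, hi, o2) :: rest, cur =>
    (if cur < lo then [((cur - o1, lo - o1), o1)] else []) ++ ((lo - o1, hi - o1), o1 + o2) :: fillB o1 e1 d1 rest hi

def merge_maps_alt (m1 : (Int × Int) × Int) (mm2 : List ((Int × Int) × Int)) : List ((Int × Int) × Int) :=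
  if m1.1.2 ≤ m1.1.1 then []
  else fillB m1.2 m1.1.2 (m1.1.2 + m1.2) (piecesB (m1.1.2 + m1.2) (pvSort mm2) (m1.1.1 + m1.2)) (m1.1.1 + m1.2)

-- ===== PRECONDITION & SPEC =====
-- Pre_ excludes empty input intervals (src_end ≤ src_start) on which some next-stage
-- bound still lies beyond the mapped start: the interval denotes no value at all, and
-- there A returns one degenerate zero-width or reversed segment while B returns the
-- empty map — a corner no caller would specify either way.
def Pre_merge_maps (m1 : (Int × Int) × Int) (mm2 : List ((Int × Int) × Int)) : Prop :=
  m1.1.1 < m1.1.2 ∨ ∀ x ∈ mm2, max x.1.1 x.1.2 ≤ m1.1.1 + m1.2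
instance (m1 : (Int × Int) × Int) (mm2 : List ((Int × Int) × Int)) : Decidable (Pre_merge_maps m1 mm2) := by unfold Pre_merge_maps; infer_instance
def pvWitness_merge_maps : ((Int × Int) × Int) × (List ((Int × Int) × Int)) := (((0, 5), 2), [((3, 9), 1)])

-- When an empty next-stage range x (x_end ≤ x_start) starts strictly inside the mapped
-- destination range and beyond every bound of the ranges preceding x in sorted order,
-- A needlessly splits a passthrough segment at that point; B returns the unsplit
-- passthrough, the intended canonical map.
def D_merge_maps (m1 : (Int × Int) × Int) (mm2 : List ((Int × Int) × Int)) : Prop :=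
  m1.1.1 < m1.1.2 ∧ ∃ x ∈ mm2, x.1.2 ≤ x.1.1 ∧ m1.1.1 + m1.2 < x.1.1 ∧ x.1.1 < m1.1.2 + m1.2 ∧
    ∀ y ∈ mm2, (y.1.1 < x.1.1 ∨ (y.1.1 = x.1.1 ∧ (y.1.2 < x.1.2 ∨ (y.1.2 = x.1.2 ∧ y.2 < x.2)))) →
      max y.1.1 y.1.2 < x.1.1
instance (m1 : (Int × Int) × Int) (mm2 : List ((Int × Int) × Int)) : Decidable (D_merge_maps m1 mm2) := by unfold D_merge_maps; infer_instance

def Spec_merge_maps (m1 : (Int × Int) × Int) (mm2 : List ((Int × Int) × Int)) (out : List ((Int × Int) × Int)) : Prop := ¬ D_merge_maps m1 mm2 → out = merge_maps_alt m1 mm2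
instance (m1 : (Int × Int) × Int) (mm2 : List ((Int × Int) × Int)) (out : List ((Int × Int) × Int)) : Decidable (Spec_merge_maps m1 mm2 out) := by unfold Spec_merge_maps; infer_instance

def pvDiffWitness_merge_maps : ((Int × Int) × Int) × (List ((Int × Int) × Int)) := (((0, 2), 0), [((1, 1), 5)])
def pvDiffWitnessOut_merge_maps : (List ((Int × Int) × Int)) × (List ((Int × Int) × Int)) := ([((0, 1), 0), ((1, 2), 0)], [((0, 2), 0)])

-- ===== CLAIM =====
def Claim_unchanged_merge_maps : Prop := ∀ (m1 : (Int × Int) × Int) (mm2 : List ((Int × Int) × Int)), Dom_merge_maps m1 mm2 → Pre_merge_maps m1 mm2 → Spec_merge_maps m1 mm2 (merge_maps m1 mm2)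
def Claim_changed_merge_maps : Prop := Dom_merge_maps (pvDiffWitness_merge_maps.1) (pvDiffWitness_merge_maps.2) ∧ Pre_merge_maps (pvDiffWitness_merge_maps.1) (pvDiffWitness_merge_maps.2) ∧ D_merge_maps (pvDiffWitness_merge_maps.1) (pvDiffWitness_merge_maps.2) ∧ merge_maps (pvDiffWitness_merge_maps.1) (pvDiffWitness_merge_maps.2) = pvDiffWitnessOut_merge_maps.1 ∧ merge_maps_alt (pvDiffWitness_merge_maps.1) (pvDiffWitness_merge_maps.2) = pvDiffWitnessOut_merge_maps.2 ∧ pvDiffWitnessOut_merge_maps.1 ≠ pvDiffWitnessOut_merge_maps.2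

-- ===== LEMMAS AND PROOFS =====

-- Python's tuple < on ((s, e), o), spelled out
def lexLt (y x : (Int × Int) × Int) : Prop :=
  y.1.1 < x.1.1 ∨ (y.1.1 = x.1.1 ∧ (y.1.2 < x.1.2 ∨ (y.1.2 = x.1.2 ∧ y.2 < x.2)))

-- the per-range condition of D_merge_maps, with an explicit context list
def badAt (d0 d1 : Int) (ctx : List ((Int × Int) × Int)) (x : (Int × Int) × Int) : Prop :=
  x.1.2 ≤ x.1.1 ∧ d0 < x.1.1 ∧ x.1.1 < d1 ∧
    ∀ y ∈ ctx, lexLt y x → max y.1.1 y.1.2 < x.1.1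

-- scan of the sorted next-stage list with the running max m of all earlier bounds:
-- false iff some empty range (e2 ≤ s2) starts strictly inside (m, d1)
def splitFree (d1 : Int) : List ((Int × Int) × Int) → Int → Bool
  | [], _ => true
  | ((s2, e2), _) :: rest, m =>
    !(decide (e2 ≤ s2) && decide (m < s2) && decide (s2 < d1)) && splitFree d1 rest (max m (max s2 e2))

lemma lexLt_iff (y x : (Int × Int) × Int) : lexLt y x ↔ pvKey y < pvKey x := by
  simp [lexLt, pvKey, Prod.Lex.lt_iff]

lemma badAt_congr (d0 d1 : Int) (ctx1 ctx2 : List ((Int × Int) × Int))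
    (h : ∀ z, z ∈ ctx1 ↔ z ∈ ctx2) (x : (Int × Int) × Int)
    (hb : badAt d0 d1 ctx1 x) : badAt d0 d1 ctx2 x :=
  ⟨hb.1, hb.2.1, hb.2.2.1, fun y hy => hb.2.2.2 y ((h y).2 hy)⟩

lemma splitFree_true_of (d0 d1 : Int) :
    ∀ (L P : List ((Int × Int) × Int)) (m : Int),
      L.Pairwise (fun a b => pvKey a ≤ pvKey b) →
      (∀ x ∈ L, ¬ badAt d0 d1 (P ++ L) x) →
      d0 ≤ m → (∀ y ∈ P, max y.1.1 y.1.2 ≤ m) →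
      splitFree d1 L m = true := by
  intro L
  induction L with
  | nil => intro P m _ _ _ _; rfl
  | cons h t ih =>
    intro P m hp hbad hd0 hP
    obtain ⟨⟨s2, e2⟩, o2⟩ := h
    have hhead : ¬ (e2 ≤ s2 ∧ m < s2 ∧ s2 < d1) := by
      rintro ⟨hes, hms, hsd⟩
      apply hbad ((s2, e2), o2) List.mem_cons_self
      refine ⟨hes, (by omega : d0 < s2), hsd, ?_⟩
      intro y hy hlt
      show max y.1.1 y.1.2 < s2
      rcases List.mem_append.1 hy with hyP | hyL
      · have := hP y hyP; omega
      · rcases List.mem_cons.1 hyL with rfl | hyt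
        · simp [lexLt] at hlt
        · have hle : pvKey ((s2, e2), o2) ≤ pvKey y := (List.pairwise_cons.1 hp).1 y hyt
          exact absurd ((lexLt_iff _ _).1 hlt) (not_lt.2 hle)
    have hb1 : (!(decide (e2 ≤ s2) && decide (m < s2) && decide (s2 < d1))) = true := by
      simp only [Bool.not_eq_true', Bool.and_eq_false_iff, decide_eq_false_iff_not]
      tauto
    simp only [splitFree, hb1, Bool.true_and]
    refine ih (P ++ [((s2, e2), o2)]) (max m (max s2 e2)) (List.pairwise_cons.1 hp).2
      ?_ (by omega) ?_
    · intro x hx hb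
      apply hbad x (List.mem_cons_of_mem _ hx)
      refine badAt_congr _ _ _ _ (fun z => ?_) x hb
      simp only [List.mem_append, List.mem_cons]
      tauto
    · intro y hy
      rcases List.mem_append.1 hy with hyP | hyh
      · have := hP y hyP; omega
      · rcases List.mem_singleton.1 hyh with rfl
        show max s2 e2 ≤ max m (max s2 e2)
        omega

-- fused single-pass form of B, used only by the proofs below
def gB (d1 e1 o1 : Int) : List ((Int × Int) × Int) → Int → List ((Int × Int) × Int)
  | [], c => if c < d1 then [((c - o1, e1), o1)] else []
  | ((s2, e2), o2) :: rest, c =>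
    if max c s2 < min e2 d1 then
      (if c < max c s2 then [((c - o1, max c s2 - o1), o1)] else []) ++
        ((max c s2 - o1, min e2 d1 - o1), o1 + o2) :: gB d1 e1 o1 rest (min e2 d1)
    else gB d1 e1 o1 rest c

lemma fill_pieces_eq_gB (d1 e1 o1 : Int) (L : List ((Int × Int) × Int)) :
    ∀ c, fillB o1 e1 d1 (piecesB d1 L c) c = gB d1 e1 o1 L c := by
  induction L with
  | nil => intro c; simp [piecesB, fillB, gB]
  | cons x rest ih =>
    obtain ⟨⟨s2, e2⟩, o2⟩ := x
    intro c
    simp only [piecesB, gB]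
    split
    · simp [fillB, ih]
    · exact ih c

lemma gB_done (d1 e1 o1 : Int) (L : List ((Int × Int) × Int)) :
    ∀ c, d1 ≤ c → gB d1 e1 o1 L c = [] := by
  induction L with
  | nil => intro c h; simp [gB]; omega
  | cons x rest ih =>
    obtain ⟨⟨s2, e2⟩, o2⟩ := x
    intro c h
    simp only [gB]
    have : ¬ (max c s2 < min e2 d1) := by omega
    simp [this, ih c h]

lemma gB_all_ge (d1 e1 o1 : Int) (L : List ((Int × Int) × Int))
    (h : ∀ x ∈ L, d1 ≤ x.1.1) : ∀ c, c < d1 → gB d1 e1 o1 L c = [((c - o1, e1), o1)] := by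
  induction L with
  | nil => intro c hc; simp [gB, hc]
  | cons x rest ih =>
    obtain ⟨⟨s2, e2⟩, o2⟩ := x
    intro c hc
    have h2 : d1 ≤ s2 := h ((s2,e2),o2) (by simp)
    have : ¬ (max c s2 < min e2 d1) := by omega
    simp only [gB, this, if_false]
    exact ih (fun x hx => h x (by simp [hx])) c hc

lemma loopA_acc (e1 d1 o1 : Int) (L : List ((Int × Int) × Int)) :
    ∀ s d acc, mergeLoopA e1 d1 o1 L s d acc =
      (acc ++ (mergeLoopA e1 d1 o1 L s d []).1, (mergeLoopA e1 d1 o1 L s d []).2) := by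
  induction L with
  | nil => intro s d acc; simp [mergeLoopA]
  | cons x rest ih =>
    obtain ⟨⟨s2, e2⟩, o2⟩ := x
    intro s d acc
    simp only [mergeLoopA]
    split_ifs with h1 h2 h3 h4 h5 h6
    · simp
    · simp
    · rw [ih _ _ (acc ++ _ ++ _), ih _ _ ([] ++ _ ++ _)]; simp
    · rw [ih _ _ (acc ++ _), ih _ _ ([] ++ _)]; simp
    · simp
    · rw [ih _ _ (acc ++ _), ih _ _ ([] ++ _)]; simp
    · exact ih s d acc

lemma loopA_skip (e1 d1 o1 : Int) (L : List ((Int × Int) × Int)) :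
    ∀ s d acc, (∀ x ∈ L, max x.1.1 x.1.2 ≤ d) → mergeLoopA e1 d1 o1 L s d acc = (acc, s) := by
  induction L with
  | nil => intro s d acc _; simp [mergeLoopA]
  | cons x rest ih =>
    obtain ⟨⟨s2, e2⟩, o2⟩ := x
    intro s d acc h
    have hx := h ((s2, e2), o2) (by simp)
    simp only [max_le_iff] at hx
    simp only [mergeLoopA]
    have h1 : ¬ d < s2 := by omega
    have h2 : ¬ d < e2 := by omega
    simp only [h1, if_false, h2]
    exact ih s d acc (fun x hx => h x (by simp [hx]))

lemma loopA_eq_gB (e1 o1 : Int) (L : List ((Int × Int) × Int)) :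
    ∀ m c s, s = c - o1 →
      L.Pairwise (fun a b => a.1.1 ≤ b.1.1) →
      splitFree (e1 + o1) L m = true →
      min (e1 + o1) m ≤ c → c < e1 + o1 →
      (if (mergeLoopA e1 (e1 + o1) o1 L s c []).2 < e1
        then (mergeLoopA e1 (e1 + o1) o1 L s c []).1 ++ [(((mergeLoopA e1 (e1 + o1) o1 L s c []).2, e1), o1)]
        else (mergeLoopA e1 (e1 + o1) o1 L s c []).1)
      = gB (e1 + o1) e1 o1 L c := by
  induction L with
  | nil =>
    intro m c s hs hp hsf hmc hc
    subst hs
    simp only [mergeLoopA, gB]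
    rw [if_pos (by omega : c - o1 < e1), if_pos hc]
    simp
  | cons x rest ih =>
    obtain ⟨⟨s2, e2⟩, o2⟩ := x
    intro m c s hs hp hsf hmc hc
    subst hs
    simp only [splitFree, Bool.and_eq_true, Bool.not_eq_eq_eq_not, Bool.not_true, Bool.and_eq_false_iff, decide_eq_false_iff_not] at hsf
    obtain ⟨hh, hsf'⟩ := hsf
    have hhd : ∀ y ∈ rest, s2 ≤ y.1.1 := fun y hy => (List.pairwise_cons.1 hp).1 y hy
    have hp' : rest.Pairwise (fun a b => a.1.1 ≤ b.1.1) := (List.pairwise_cons.1 hp).2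
    simp only [mergeLoopA, gB]
    by_cases h1 : c < s2
    · rw [if_pos h1]
      by_cases hb : e1 + o1 ≤ s2
      · -- passthrough up to dest1_end, then break
        rw [show min s2 (e1 + o1) = e1 + o1 from by omega,
          if_pos (by omega : c - o1 + (e1 + o1 - c) = e1),
          if_neg (by omega : ¬ (max c s2 < min e2 (e1 + o1))),
          gB_all_ge _ _ _ _ (fun y hy => le_trans hb (hhd y hy)) c hc,
          if_neg (by omega : ¬ (c - o1 + (e1 + o1 - c) < e1))]
        simp only [List.nil_append, List.cons.injEq, Prod.mk.injEq, and_true]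
        and_intros <;> first | trivial | omega
      · rw [show min s2 (e1 + o1) = s2 from by omega,
          if_neg (by omega : ¬ (c - o1 + (s2 - c) = e1)),
          show max c s2 = s2 from by omega]
        by_cases h3 : s2 < e2
        · rw [if_pos (by omega : c + (s2 - c) < e2)]
          by_cases h4 : e1 + o1 ≤ e2
          · -- total overlap after a passthrough piece, then break
            rw [if_pos h4, show min e2 (e1 + o1) = e1 + o1 from by omega,
              if_neg (by omega : ¬ (e1 < e1)),
              if_pos (by omega : s2 < e1 + o1),
              if_pos (by omega : c < s2),
              gB_done _ _ _ _ _ (le_refl (e1 + o1))]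
            simp only [List.nil_append, List.cons_append, List.cons.injEq, Prod.mk.injEq, and_true]
            and_intros <;> first | trivial | omega
          · -- partial overlap after a passthrough piece
            rw [if_neg h4, show min e2 (e1 + o1) = e2 from by omega,
              if_pos (by omega : s2 < e2), if_pos (by omega : c < s2),
              loopA_acc,
              show c - o1 + (s2 - c) + (e2 - (c + (s2 - c))) + o1 = e2 from by omega]
            have hrec := ih (max m (max s2 e2)) e2 (c - o1 + (s2 - c) + (e2 - (c + (s2 - c))))
              (by omega) hp' hsf' (by omega) (by omega)
            simp only [List.nil_append, List.cons_append]
            split_ifs with hw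
            · rw [if_pos hw] at hrec
              rw [hrec]
              simp only [List.cons.injEq, Prod.mk.injEq, and_true]
              and_intros <;> first | trivial | omega
            · rw [if_neg hw] at hrec
              rw [hrec]
              simp only [List.cons.injEq, Prod.mk.injEq, and_true]
              and_intros <;> first | trivial | omega
        · -- empty next-stage range starting inside: excluded by splitFree
          exfalso; omega
    · rw [if_neg h1, show max c s2 = c from by omega]
      by_cases h5 : c < e2
      · rw [if_pos h5]
        by_cases h6 : e1 + o1 ≤ e2
        · -- total overlap, break
          rw [if_pos h6, show min e2 (e1 + o1) = e1 + o1 from by omega,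
            if_neg (by omega : ¬ (e1 < e1)),
            if_pos (by omega : c < e1 + o1),
            if_neg (by omega : ¬ (c < c)),
            gB_done _ _ _ _ _ (le_refl (e1 + o1))]
          simp only [List.nil_append, List.cons.injEq, Prod.mk.injEq, and_true]
          and_intros <;> first | trivial | omega
        · -- partial overlap
          rw [if_neg h6, show min e2 (e1 + o1) = e2 from by omega,
            if_pos (by omega : c < e2), if_neg (by omega : ¬ (c < c)),
            loopA_acc,
            show c - o1 + (e2 - c) + o1 = e2 from by omega]
          have hrec := ih (max m (max s2 e2)) e2 (c - o1 + (e2 - c)) (by omega) hp' hsf'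
            (by omega) (by omega)
          simp only [List.nil_append, List.cons_append]
          split_ifs with hw
          · rw [if_pos hw] at hrec
            rw [hrec]
            simp only [List.cons.injEq, Prod.mk.injEq, and_true]
            and_intros <;> first | trivial | omega
          · rw [if_neg hw] at hrec
            rw [hrec]
            simp only [List.cons.injEq, Prod.mk.injEq, and_true]
            and_intros <;> first | trivial | omega
      · rw [if_neg h5, if_neg (by omega : ¬ (c < min e2 (e1 + o1)))]
        exact ih (max m (max s2 e2)) c (c - o1) rfl hp' hsf' (by omega) hc

lemma pvSort_pairwise (mm2 : List ((Int × Int) × Int)) :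
    (pvSort mm2).Pairwise (fun a b => a.1.1 ≤ b.1.1) := by
  have := PySem.List.sorted_pairwise mm2 pvKey
  refine this.imp ?_
  intro a b h
  rcases Prod.Lex.le_iff.1 h with h1 | ⟨h1, _⟩
  · exact le_of_lt h1
  · exact le_of_eq h1

-- ===== VERDICT =====
theorem merge_maps_spec : Claim_unchanged_merge_maps := by
  intro m1 mm2 hdom hpre hnd
  obtain ⟨⟨s1, e1⟩, o1⟩ := m1
  simp only [D_merge_maps, not_and] at hnd
  by_cases hlt : s1 < e1
  · have hsf : splitFree (e1 + o1) (pvSort mm2) (s1 + o1) = true := by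
      refine splitFree_true_of (s1 + o1) (e1 + o1) (pvSort mm2) [] (s1 + o1)
        (PySem.List.sorted_pairwise mm2 pvKey) ?_ le_rfl (by simp)
      intro x hx hb
      have hx' : x ∈ mm2 := (PySem.List.mem_sorted mm2 pvKey false x).1 hx
      have hb' : badAt (s1 + o1) (e1 + o1) mm2 x := by
        refine badAt_congr _ _ _ _ (fun z => ?_) x (by simpa using hb)
        exact PySem.List.mem_sorted mm2 pvKey false z
      exact hnd hlt ⟨x, hx', hb'⟩
    have hmain := loopA_eq_gB e1 o1 (pvSort mm2) (s1 + o1) (s1 + o1) s1 (by omega)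
      (pvSort_pairwise mm2) hsf (by omega) (by omega)
    simp only [merge_maps, merge_maps_alt]
    rw [if_neg (by omega : ¬ (e1 ≤ s1))]
    rw [fill_pieces_eq_gB]
    exact hmain
  · rcases (hpre : s1 < e1 ∨ ∀ x ∈ mm2, max x.1.1 x.1.2 ≤ s1 + o1) with h | hall0
    · exact absurd h hlt
    · have hall : ∀ x ∈ pvSort mm2, max x.1.1 x.1.2 ≤ s1 + o1 := by
        intro x hx
        exact hall0 x ((PySem.List.mem_sorted mm2 pvKey false x).1 hx)
      simp only [merge_maps, merge_maps_alt]
      rw [loopA_skip _ _ _ _ _ _ _ hall]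
      rw [if_neg hlt, if_pos (by omega : e1 ≤ s1)]

theorem merge_maps_changed : Claim_changed_merge_maps := by
  unfold Claim_changed_merge_maps; decide
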